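-- pv_equiv track=rewrite | github.com/chegelawrence/liminal | bugbounty/tools/ai_path_generator.py | _summarize_js_paths
-- ===== SOURCE A (Python) =====
-- _MAX_JS_PATHS = 60
--
-- def _summarize_js_paths(paths: list[str]) -> str:
--     """Select the most interesting JS-extracted paths for the prompt."""
--     if not paths:
--         return "No paths extracted from JavaScript files."
--
--     interesting_keywords = [
--         "admin", "internal", "manage", "debug", "config",
--         "api", "v1", "v2", "v3", "private", "secure",
--         "auth", "dashboard", "panel", "console", "monitor",
--     ]
--     scored: list[tuple[int, str]] = []
--     for p in paths:
--         score = sum(1 for kw in interesting_keywords if kw in p.lower())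
--         scored.append((score, p))
--     scored.sort(key=lambda x: (-x[0], x[1]))
--     top = [p for _, p in scored[:_MAX_JS_PATHS]]
--     return "\n".join(f"- {p}" for p in top)
-- ===== SOURCE B (Python) =====
-- _MAX_JS_PATHS = 60
--
-- def _summarize_js_paths(paths: list[str]) -> str:
--     """Bucket paths by keyword score instead of one global tuple sort."""
--     if not paths:
--         return "No paths extracted from JavaScript files."
--
--     interesting_keywords = [
--         "admin", "internal", "manage", "debug", "config",
--         "api", "v1", "v2", "v3", "private", "secure",
--         "auth", "dashboard", "panel", "console", "monitor",
--     ]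
--
--     def score(p: str) -> int:
--         low = p.lower()
--         return sum(1 for kw in interesting_keywords if kw in low)
--
--     sc = [score(p) for p in paths]
--     out: list[str] = []
--     for s in sorted(set(sc), reverse=True):
--         out.extend(sorted(p for p, t in zip(paths, sc) if t == s))
--     top = out[:_MAX_JS_PATHS]
--     return "\n".join(f"- {p}" for p in top)
-- ===== Notes on version B (the rewrite author's own statement) =====
-- stated objective: alternative
-- what changed: Replaces the single global sort over (-score, path) tuples by score bucketing: scores are computed once (lower() hoisted), the distinct scores are visited in descending order, and each score's bucket of paths is sorted lexicographically and appended, then the concatenation is cut at 60.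
import Mathlib
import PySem

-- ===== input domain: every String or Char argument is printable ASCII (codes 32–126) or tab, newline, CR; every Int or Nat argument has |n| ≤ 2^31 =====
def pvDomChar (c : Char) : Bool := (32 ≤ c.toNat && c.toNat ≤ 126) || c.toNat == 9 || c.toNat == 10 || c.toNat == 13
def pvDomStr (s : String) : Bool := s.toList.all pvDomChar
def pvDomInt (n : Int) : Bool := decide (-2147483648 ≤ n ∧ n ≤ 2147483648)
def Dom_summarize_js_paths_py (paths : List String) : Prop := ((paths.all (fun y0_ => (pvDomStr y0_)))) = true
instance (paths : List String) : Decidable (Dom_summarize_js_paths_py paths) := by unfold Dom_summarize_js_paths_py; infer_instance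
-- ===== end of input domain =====

-- B buckets paths by keyword score instead of one global tuple sort; alternative decomposition, same exact output.

-- ===== PORT A =====
def pvKeywords : List String :=
  ["admin", "internal", "manage", "debug", "config",
   "api", "v1", "v2", "v3", "private", "secure",
   "auth", "dashboard", "panel", "console", "monitor"]

def summarize_js_paths_py (paths : List String) : String :=
  if paths = [] then "No paths extracted from JavaScript files."
  else
    let scored : List (Int × String) :=
      paths.map (fun p =>
        ((pvKeywords.map (fun kw => if PySem.Str.isIn kw (PySem.Str.lower p) then (1 : Int) else 0)).sum, p))
    let sortd := PySem.List.sorted scored (fun x => toLex (-x.1, x.2)) false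
    let top := (PySem.List.slice sortd none (some (60 : Int))).map Prod.snd
    PySem.Str.join "\n" (top.map (fun p => "- " ++ p))

-- ===== PORT B =====
def pvScore (p : String) : Int :=
  let low := PySem.Str.lower p
  (pvKeywords.map (fun kw => if PySem.Str.isIn kw low then (1 : Int) else 0)).sum

def summarize_js_paths_py_alt (paths : List String) : String :=
  if paths = [] then "No paths extracted from JavaScript files."
  else
    let sc := paths.map pvScore
    let out := (PySem.List.sorted (PySem.Set.ofList sc) (fun x => x) true).flatMap
      (fun s => PySem.List.sorted (((paths.zip sc).filter (fun q => q.2 == s)).map Prod.fst) (fun x => x) false)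
    let top := PySem.List.slice out none (some (60 : Int))
    PySem.Str.join "\n" (top.map (fun p => "- " ++ p))

-- ===== PRECONDITION & SPEC =====
def Spec_summarize_js_paths_py (paths : List String) (out : String) : Prop := out = summarize_js_paths_py_alt paths
instance (paths : List String) (out : String) : Decidable (Spec_summarize_js_paths_py paths out) := by unfold Spec_summarize_js_paths_py; infer_instance

-- ===== CLAIM (what is proved, stated in full; the proofs are below) =====
def Claim_equal_summarize_js_paths_py : Prop := ∀ (paths : List String), Dom_summarize_js_paths_py paths → Spec_summarize_js_paths_py paths (summarize_js_paths_py paths)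

-- ===== LEMMAS AND PROOFS =====

-- the bucketed list, written over pairs (score, path)
def pvOutPairs (paths : List String) : List (Int × String) :=
  (PySem.List.sorted (PySem.Set.ofList (paths.map pvScore)) (fun x => x) true).flatMap
    (fun s => (PySem.List.sorted (paths.filter (fun p => pvScore p == s)) (fun x => x) false).map (fun p => (s, p)))

lemma pv_zip_self_map (l : List String) : l.zip (l.map pvScore) = l.map (fun p => (p, pvScore p)) := by
  induction l with
  | nil => rfl
  | cons h t ih => simp [ih]

lemma pv_partition_perm (D : List Int) (l : List (Int × String))
    (hnd : D.Nodup) (hmem : ∀ x ∈ l, x.1 ∈ D) :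
    (D.flatMap (fun s => l.filter (fun x => x.1 == s))).Perm l := by
  induction D generalizing l with
  | nil =>
    have : l = [] := by
      cases l with
      | nil => rfl
      | cons x t => exact absurd (hmem x (List.mem_cons_self)) (by simp)
    simp [this]
  | cons s D ih =>
    have hsD : s ∉ D := (List.nodup_cons.mp hnd).1
    have hndD : D.Nodup := (List.nodup_cons.mp hnd).2
    have hcongr : ∀ s' ∈ D,
        l.filter (fun x => x.1 == s') = (l.filter (fun x => !(x.1 == s))).filter (fun x => x.1 == s') := by
      intro s' hs'
      have hne : s' ≠ s := fun h => hsD (h ▸ hs')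
      rw [List.filter_filter]
      apply List.filter_congr
      intro x _
      by_cases hx : x.1 = s'
      · simp [hx, hne]
      · simp [hx]
    have hflat : D.flatMap (fun s' => l.filter (fun x => x.1 == s'))
        = D.flatMap (fun s' => (l.filter (fun x => !(x.1 == s))).filter (fun x => x.1 == s')) := by
      apply List.flatMap_congr
      intro s' hs'
      exact hcongr s' hs'
    have hmem' : ∀ x ∈ l.filter (fun x => !(x.1 == s)), x.1 ∈ D := by
      intro x hx
      have h1 := (List.mem_filter.mp hx).1
      have h2 := (List.mem_filter.mp hx).2
      have := hmem x h1
      simp at h2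
      simpa [h2] using this
    have hperm := ih (l.filter (fun x => !(x.1 == s))) hndD hmem'
    have hsplit : ((s :: D).flatMap (fun s' => l.filter (fun x => x.1 == s')))
        = l.filter (fun x => x.1 == s) ++ D.flatMap (fun s' => l.filter (fun x => x.1 == s')) := by
      simp [List.flatMap_cons]
    rw [hsplit, hflat]
    exact (List.Perm.append (List.Perm.refl _) hperm).trans (List.filter_append_perm _ l)

lemma pv_outPairs_perm (paths : List String) :
    (pvOutPairs paths).Perm (paths.map (fun p => (pvScore p, p))) := by
  set scored := paths.map (fun p => (pvScore p, p)) with hscored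
  set D := PySem.List.sorted (PySem.Set.ofList (paths.map pvScore)) (fun x => x) true with hD
  have hndD : D.Nodup := by
    exact ((PySem.List.sorted_perm (PySem.Set.ofList (paths.map pvScore)) (fun x => x) true).symm).nodup
      (PySem.Set.nodup_ofList _)
  have hmem : ∀ x ∈ scored, x.1 ∈ D := by
    intro x hx
    rw [hscored] at hx
    obtain ⟨p, hp, rfl⟩ := List.mem_map.mp hx
    rw [hD, PySem.List.mem_sorted, PySem.Set.mem_ofList]
    exact List.mem_map.mpr ⟨p, hp, rfl⟩
  have hbucket : ∀ s ∈ D,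
      ((PySem.List.sorted (paths.filter (fun p => pvScore p == s)) (fun x => x) false).map (fun p => (s, p))).Perm
        (scored.filter (fun x => x.1 == s)) := by
    intro s _
    have h1 : scored.filter (fun x => x.1 == s)
        = (paths.filter (fun p => pvScore p == s)).map (fun p => (s, p)) := by
      rw [hscored, List.filter_map]
      have : ((fun x : Int × String => x.1 == s) ∘ (fun p => (pvScore p, p))) = (fun p => pvScore p == s) := rfl
      rw [this]
      apply List.map_congr_left
      intro p hp
      have := (List.mem_filter.mp hp).2
      simp at this
      simp [this]
    rw [h1]
    exact List.Perm.map _ (PySem.List.sorted_perm _ _ _)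
  have h1 : (pvOutPairs paths).Perm (D.flatMap (fun s => scored.filter (fun x => x.1 == s))) :=
    List.Perm.flatMap (List.Perm.refl D) hbucket
  exact h1.trans (pv_partition_perm D scored hndD hmem)

lemma pv_outPairs_pairwise (paths : List String) :
    (pvOutPairs paths).Pairwise (fun a b => toLex (-a.1, a.2) ≤ toLex (-b.1, b.2)) := by
  rw [pvOutPairs, List.pairwise_flatMap]
  constructor
  · intro s _
    rw [List.pairwise_map]
    have := PySem.List.sorted_pairwise (paths.filter (fun p => pvScore p == s)) (fun x => x)
    apply this.imp
    intro a b hab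
    exact Prod.Lex.toLex_le_toLex.mpr (Or.inr ⟨rfl, hab⟩)
  · have hrev := PySem.List.sorted_pairwise_rev (PySem.Set.ofList (paths.map pvScore)) (fun x => x)
    have hnd : (PySem.List.sorted (PySem.Set.ofList (paths.map pvScore)) (fun x => x) true).Nodup :=
      ((PySem.List.sorted_perm (PySem.Set.ofList (paths.map pvScore)) (fun x => x) true).symm).nodup
        (PySem.Set.nodup_ofList _)
    have hgt := (hrev.and hnd).imp (fun {a b} h => lt_of_le_of_ne h.1 (fun he => h.2 (he ▸ rfl)))
    apply hgt.imp
    intro s1 s2 hlt x hx y hy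
    obtain ⟨p, _, rfl⟩ := List.mem_map.mp hx
    obtain ⟨q, _, rfl⟩ := List.mem_map.mp hy
    exact le_of_lt (Prod.Lex.toLex_lt_toLex.mpr (Or.inl (by simp only; omega)))

lemma pv_sorted_eq_outPairs (paths : List String) :
    PySem.List.sorted (paths.map (fun p => (pvScore p, p))) (fun x => toLex (-x.1, x.2)) false = pvOutPairs paths := by
  apply List.Perm.eq_of_pairwise (le := fun a b => toLex (-a.1, a.2) ≤ toLex (-b.1, b.2))
  · intro a b _ _ h1 h2
    have hk : toLex ((-a.1, a.2) : Int × String) = toLex (-b.1, b.2) := le_antisymm h1 h2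
    have hp : ((-a.1, a.2) : Int × String) = (-b.1, b.2) := toLex.injective hk
    rw [Prod.ext_iff] at hp
    have h1' : a.1 = b.1 := by have := hp.1; simp only at this; omega
    exact Prod.ext h1' hp.2
  · exact PySem.List.sorted_pairwise _ _
  · exact pv_outPairs_pairwise paths
  · exact (PySem.List.sorted_perm _ _ _).trans (pv_outPairs_perm paths).symm

lemma pv_out_eq (paths : List String) :
    (PySem.List.sorted (PySem.Set.ofList (paths.map pvScore)) (fun x => x) true).flatMap
      (fun s => PySem.List.sorted (((paths.zip (paths.map pvScore)).filter (fun q => q.2 == s)).map Prod.fst) (fun x => x) false)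
    = (pvOutPairs paths).map Prod.snd := by
  rw [pvOutPairs, List.map_flatMap]
  apply List.flatMap_congr
  intro s _
  have h1 : ((paths.zip (paths.map pvScore)).filter (fun q => q.2 == s)).map Prod.fst
      = paths.filter (fun p => pvScore p == s) := by
    rw [pv_zip_self_map, List.filter_map]
    have : ((fun q : String × Int => q.2 == s) ∘ (fun p => (p, pvScore p))) = (fun p => pvScore p == s) := rfl
    rw [this, List.map_map]
    exact List.map_id' _
  rw [h1, List.map_map]
  exact (List.map_id' _).symm

-- ===== VERDICT (by name: the statement is the Claim_ definition above) =====
theorem summarize_js_paths_py_spec : Claim_equal_summarize_js_paths_py := by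
  intro paths _
  unfold Spec_summarize_js_paths_py summarize_js_paths_py summarize_js_paths_py_alt
  by_cases h : paths = []
  · simp [h]
  · simp only [h, if_false]
    have hscore : (fun p => ((pvKeywords.map (fun kw => if PySem.Str.isIn kw (PySem.Str.lower p) then (1 : Int) else 0)).sum, p))
        = (fun p : String => (pvScore p, p)) := rfl
    rw [hscore, pv_sorted_eq_outPairs, pv_out_eq]
    rw [PySem.List.slice_to _ (by norm_num), PySem.List.slice_to _ (by norm_num)]
    rw [← List.map_take]
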